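-- pv_equiv track=rewrite | github.com/Gefolgwar/A-Maze-ing | a_maze_ing.py | _compute_diamond_outside
-- ===== SOURCE A (Python) =====
-- from typing import Dict, List, Optional, Set, Tuple, Any
--
-- def _compute_diamond_outside(
--     width: int, height: int
-- ) -> Set[Tuple[int, int]]:
--     """Return cells outside the diamond shape.
--
--     Uses the same algorithm as ``MazeGenerator._compute_diamond_outside``
--     so validation matches actual generation.
--     """
--     half_h: int = height // 2
--     half_w: int = width // 2
--     radius: int = min(half_h, half_w)
--     cr: int = height // 2
--     cc: int = width // 2
--     outside: Set[Tuple[int, int]] = set()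
--     for r in range(height):
--         for c in range(width):
--             if abs(r - cr) + abs(c - cc) > radius:
--                 outside.add((r, c))
--     return outside
-- ===== SOURCE B (Python) =====
-- def _compute_diamond_outside(width, height):
--     """Return cells outside the diamond shape, row by row via interval endpoints."""
--     radius = min(height // 2, width // 2)
--     cr = height // 2
--     cc = width // 2
--     outside = set()
--     for r in range(height):
--         d = radius - abs(r - cr)
--         if d < 0:
--             outside.update((r, c) for c in range(width))
--         else:
--             outside.update((r, c) for c in range(cc - d))
--             outside.update((r, c) for c in range(cc + d + 1, width))
--     return outside
-- ===== Notes on version B (the rewrite author's own statement) =====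
-- stated objective: alternative
-- what changed: Replaces A's per-cell abs-distance test over every (row, column) pair with a per-row computation of the diamond's interval endpoints, emitting the two complementary column ranges (or the full row) directly.
import Mathlib
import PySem

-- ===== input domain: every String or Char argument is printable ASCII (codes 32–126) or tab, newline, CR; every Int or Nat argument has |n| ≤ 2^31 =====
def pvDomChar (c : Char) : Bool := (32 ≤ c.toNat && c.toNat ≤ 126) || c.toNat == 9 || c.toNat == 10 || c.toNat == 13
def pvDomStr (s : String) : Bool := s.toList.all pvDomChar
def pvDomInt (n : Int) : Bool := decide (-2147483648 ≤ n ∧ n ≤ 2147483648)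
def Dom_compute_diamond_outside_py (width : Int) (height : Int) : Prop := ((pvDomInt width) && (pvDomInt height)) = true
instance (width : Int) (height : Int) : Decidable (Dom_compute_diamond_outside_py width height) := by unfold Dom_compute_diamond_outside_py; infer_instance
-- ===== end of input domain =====

-- B replaces A's per-cell abs-distance test over the whole grid by per-row interval
-- endpoints (two complementary column ranges per row): a different traversal, same set.

-- ===== PORT A =====
def compute_diamond_outside_py (width : Int) (height : Int) : List (Int × Int) :=
  let half_h := PySem.Int.floordiv height 2
  let half_w := PySem.Int.floordiv width 2
  let radius := min half_h half_w
  let cr := PySem.Int.floordiv height 2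
  let cc := PySem.Int.floordiv width 2
  (PySem.List.pyRange 0 height 1).foldl (fun outside r =>
    (PySem.List.pyRange 0 width 1).foldl (fun outside c =>
      if |r - cr| + |c - cc| > radius then PySem.Set.add outside (r, c) else outside)
      outside) PySem.Set.empty

-- ===== PORT B =====
def compute_diamond_outside_py_alt (width : Int) (height : Int) : List (Int × Int) :=
  let radius := min (PySem.Int.floordiv height 2) (PySem.Int.floordiv width 2)
  let cr := PySem.Int.floordiv height 2
  let cc := PySem.Int.floordiv width 2
  (PySem.List.pyRange 0 height 1).foldl (fun outside r =>
    let d := radius - |r - cr|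
    if d < 0 then
      PySem.Set.update outside ((PySem.List.pyRange 0 width 1).map (fun c => (r, c)))
    else
      PySem.Set.update
        (PySem.Set.update outside ((PySem.List.pyRange 0 (cc - d) 1).map (fun c => (r, c))))
        ((PySem.List.pyRange (cc + d + 1) width 1).map (fun c => (r, c)))) PySem.Set.empty

-- ===== PRECONDITION & SPEC =====
def Spec_compute_diamond_outside_py (width : Int) (height : Int) (out : List (Int × Int)) : Prop := out = compute_diamond_outside_py_alt width height
instance (width : Int) (height : Int) (out : List (Int × Int)) : Decidable (Spec_compute_diamond_outside_py width height out) := by unfold Spec_compute_diamond_outside_py; infer_instance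

-- ===== CLAIM (what is proved, stated in full; the proofs are below) =====
def Claim_equal_compute_diamond_outside_py : Prop := ∀ (width : Int) (height : Int), Dom_compute_diamond_outside_py width height → Spec_compute_diamond_outside_py width height (compute_diamond_outside_py width height)

-- ===== LEMMAS AND PROOFS =====

-- when the whole row lies outside the diamond, the filter keeps every column
lemma pv_filter_all (width cc radius e : Int) (he : 0 ≤ e) (hd : radius - e < 0) :
    (PySem.List.pyRange 0 width 1).filter (fun c => decide (e + |c - cc| > radius))
      = PySem.List.pyRange 0 width 1 := by
  apply List.filter_eq_self.mpr
  intro c _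
  have h := abs_nonneg (c - cc)
  simp only [decide_eq_true_eq]
  omega

-- when the row meets the diamond, the filter is exactly the two complementary ranges
lemma pv_filter_split (width cc radius e : Int) (he : 0 ≤ e) (hd : 0 ≤ radius - e)
    (hcw : cc - (radius - e) ≤ width) (h0 : 0 ≤ cc + (radius - e) + 1) :
    (PySem.List.pyRange 0 width 1).filter (fun c => decide (e + |c - cc| > radius))
      = PySem.List.pyRange 0 (cc - (radius - e)) 1
        ++ PySem.List.pyRange (cc + (radius - e) + 1) width 1 := by
  set d := radius - e with hdd
  have hs1 : ((PySem.List.pyRange 0 width 1).filter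
      (fun c => decide (e + |c - cc| > radius))).Pairwise (· < ·) :=
    (PySem.List.pairwise_lt_pyRange_one 0 width).filter _
  have hs2 : (PySem.List.pyRange 0 (cc - d) 1
      ++ PySem.List.pyRange (cc + d + 1) width 1).Pairwise (· < ·) := by
    rw [List.pairwise_append]
    refine ⟨PySem.List.pairwise_lt_pyRange_one _ _, PySem.List.pairwise_lt_pyRange_one _ _, ?_⟩
    intro a ha b hb
    rw [PySem.List.mem_pyRange_one] at ha hb
    omega
  have hn1 := hs1.imp (fun h => ne_of_lt h)
  have hn2 := hs2.imp (fun h => ne_of_lt h)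
  refine List.Perm.eq_of_pairwise (fun a b _ _ h1 h2 => absurd h2 (lt_asymm h1))
    hs1 hs2 ((List.perm_ext_iff_of_nodup hn1 hn2).mpr ?_)
  intro c
  simp only [List.mem_filter, List.mem_append, PySem.List.mem_pyRange_one, decide_eq_true_eq]
  rcases le_total cc c with h | h
  · rw [abs_of_nonneg (by omega : (0:Int) ≤ c - cc)]; omega
  · rw [abs_of_nonpos (by omega : c - cc ≤ (0:Int))]; omega

-- the rows fold: A's step and B's step agree under the fresh-row invariant
lemma pv_rows_fold (width cc radius cr : Int)
    (hrc : radius ≤ cc) (hcw : 0 ≤ radius → 0 ≤ cc ∧ cc ≤ width)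
    (rows : List Int) (s : List (Int × Int))
    (hnd : rows.Nodup) (hs : ∀ p ∈ s, p.1 ∉ rows) :
    rows.foldl (fun outside r =>
        (PySem.List.pyRange 0 width 1).foldl (fun outside c =>
          if |r - cr| + |c - cc| > radius then PySem.Set.add outside (r, c) else outside)
          outside) s
      = rows.foldl (fun outside r =>
          let d := radius - |r - cr|
          if d < 0 then
            PySem.Set.update outside ((PySem.List.pyRange 0 width 1).map (fun c => (r, c)))
          else
            PySem.Set.update
              (PySem.Set.update outside
                ((PySem.List.pyRange 0 (cc - d) 1).map (fun c => (r, c))))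
              ((PySem.List.pyRange (cc + d + 1) width 1).map (fun c => (r, c)))) s := by
  induction rows generalizing s with
  | nil => rfl
  | cons r rest ih =>
    simp only [List.foldl_cons]
    have hfresh : ∀ c : Int, (r, c) ∉ s := by
      intro c hc
      exact (hs (r, c) hc) (by simp)
    have he : (0:Int) ≤ |r - cr| := abs_nonneg _
    -- A's inner loop as an update with the filtered columns
    have hA : (PySem.List.pyRange 0 width 1).foldl (fun outside c =>
          if |r - cr| + |c - cc| > radius then PySem.Set.add outside (r, c) else outside) s
        = s ++ (((PySem.List.pyRange 0 width 1).filter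
            (fun c => decide (|r - cr| + |c - cc| > radius))).map (fun c => (r, c))) := by
      rw [PySem.List.foldl_ite_eq_foldl_filter,
          ← PySem.Set.update_map_eq_foldl_add]
      apply PySem.Set.update_eq_append_of_disjoint
      · exact (List.Nodup.filter _ (PySem.List.nodup_pyRange_one 0 width)).map
          (fun a b h => (congrArg Prod.snd h : a = b))
      · intro x hx
        rcases List.mem_map.mp hx with ⟨c, _, rfl⟩
        exact hfresh c
    set d := radius - |r - cr| with hdd
    by_cases hneg : d < 0
    · -- full row
      have hB : PySem.Set.update s ((PySem.List.pyRange 0 width 1).map (fun c => (r, c)))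
          = s ++ ((PySem.List.pyRange 0 width 1).map (fun c => (r, c))) := by
        apply PySem.Set.update_eq_append_of_disjoint
        · exact (PySem.List.nodup_pyRange_one 0 width).map
            (fun a b h => (congrArg Prod.snd h : a = b))
        · intro x hx
          rcases List.mem_map.mp hx with ⟨c, _, rfl⟩
          exact hfresh c
      rw [hA, pv_filter_all width cc radius _ he (by omega)]
      simp only [if_pos hneg]
      rw [hB]
      refine ih _ (List.nodup_cons.mp hnd).2 ?_
      intro p hp
      rcases List.mem_append.mp hp with h | h
      · exact fun hm => hs p h (List.mem_cons_of_mem _ hm)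
      · rcases List.mem_map.mp h with ⟨c, _, rfl⟩
        exact fun hm => (List.nodup_cons.mp hnd).1 hm
    · -- split row
      have hge : 0 ≤ d := by omega
      have h0r : 0 ≤ radius := by omega
      clear hneg
      obtain ⟨hc0, hcww⟩ := hcw h0r
      have hB : PySem.Set.update
            (PySem.Set.update s ((PySem.List.pyRange 0 (cc - d) 1).map (fun c => (r, c))))
            ((PySem.List.pyRange (cc + d + 1) width 1).map (fun c => (r, c)))
          = s ++ (((PySem.List.pyRange 0 (cc - d) 1)
              ++ (PySem.List.pyRange (cc + d + 1) width 1)).map (fun c => (r, c))) := by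
        have h1 : PySem.Set.update s ((PySem.List.pyRange 0 (cc - d) 1).map (fun c => (r, c)))
            = s ++ ((PySem.List.pyRange 0 (cc - d) 1).map (fun c => (r, c))) := by
          apply PySem.Set.update_eq_append_of_disjoint
          · exact (PySem.List.nodup_pyRange_one _ _).map
              (fun a b h => (congrArg Prod.snd h : a = b))
          · intro x hx
            rcases List.mem_map.mp hx with ⟨c, _, rfl⟩
            exact hfresh c
        rw [h1]
        have h2 : PySem.Set.update
              (s ++ ((PySem.List.pyRange 0 (cc - d) 1).map (fun c => (r, c))))
              ((PySem.List.pyRange (cc + d + 1) width 1).map (fun c => (r, c)))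
            = (s ++ ((PySem.List.pyRange 0 (cc - d) 1).map (fun c => (r, c))))
              ++ ((PySem.List.pyRange (cc + d + 1) width 1).map (fun c => (r, c))) := by
          apply PySem.Set.update_eq_append_of_disjoint
          · exact (PySem.List.nodup_pyRange_one _ _).map
              (fun a b h => (congrArg Prod.snd h : a = b))
          · intro x hx
            rcases List.mem_map.mp hx with ⟨c, hc, rfl⟩
            rw [PySem.List.mem_pyRange_one] at hc
            intro hmem
            rcases List.mem_append.mp hmem with h | h
            · exact hfresh c h
            · rcases List.mem_map.mp h with ⟨c', hc', hcc'⟩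
              rw [PySem.List.mem_pyRange_one] at hc'
              have : c' = c := congrArg Prod.snd hcc'
              omega
        rw [h2, List.append_assoc, List.map_append]
      rw [hA, pv_filter_split width cc radius _ he (by omega) (by omega) (by omega)]
      simp only [if_neg (by omega : ¬ d < 0)]
      rw [hB]
      refine ih _ (List.nodup_cons.mp hnd).2 ?_
      intro p hp
      rcases List.mem_append.mp hp with h | h
      · exact fun hm => hs p h (List.mem_cons_of_mem _ hm)
      · rcases List.mem_map.mp h with ⟨c, _, rfl⟩
        exact fun hm => (List.nodup_cons.mp hnd).1 hm

-- ===== VERDICT (by name: the statement is the Claim_ definition above) =====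
theorem compute_diamond_outside_py_spec : Claim_equal_compute_diamond_outside_py := by
  intro width height _
  unfold Spec_compute_diamond_outside_py compute_diamond_outside_py compute_diamond_outside_py_alt
  simp only []
  apply pv_rows_fold
  · exact min_le_right _ _
  · intro h0
    have h1 : PySem.Int.floordiv width 2 = width / 2 :=
      PySem.Int.floordiv_eq_ediv_of_pos (by omega)
    have hw : 0 ≤ PySem.Int.floordiv width 2 := le_trans h0 (min_le_right _ _)
    rw [h1] at hw ⊢
    omega
  · exact PySem.List.nodup_pyRange_one 0 height
  · intro p hp
    simp [PySem.Set.empty] at hp
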